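-- pv_equiv track=rewrite | github.com/isorabins/wingman | reference_files/docs/planning_docs/db_driven_agent_system.py | _extract_answer
-- ===== SOURCE A (Python) =====
-- from typing import Dict, List, Any, Optional, Tuple
--
-- def _extract_answer(message: str) -> Optional[str]:
--     """Extract A-F answer from message"""
--     message_clean = message.strip().upper()
--
--     if len(message_clean) == 1 and message_clean in ['A', 'B', 'C', 'D', 'E', 'F']:
--         return message_clean
--
--     for letter in ['A', 'B', 'C', 'D', 'E', 'F']:
--         patterns = [f"{letter} ", f"{letter}.", f"{letter})", f"({letter}"]
--         if any(message_clean.startswith(pattern) for pattern in patterns):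
--             return letter
--
--     return None
-- ===== SOURCE B (Python) =====
-- from typing import Optional
--
-- def _extract_answer(message: str) -> Optional[str]:
--     """Extract A-F answer from message (positional parse, no pattern loop)."""
--     mc = message.strip().upper()
--     if not mc:
--         return None
--     if len(mc) == 1:
--         return mc if mc in "ABCDEF" else None
--     c0, c1 = mc[0], mc[1]
--     if c0 in "ABCDEF" and c1 in " .)":
--         return c0
--     if c0 == "(" and c1 in "ABCDEF":
--         return c1
--     return None
-- ===== Notes on version B (the rewrite author's own statement) =====
-- stated objective: simpler
-- what changed: Replaces the per-letter loop over six letters and four formatted prefix patterns with a direct positional parse of the first two characters of the cleaned string.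
import Mathlib
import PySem

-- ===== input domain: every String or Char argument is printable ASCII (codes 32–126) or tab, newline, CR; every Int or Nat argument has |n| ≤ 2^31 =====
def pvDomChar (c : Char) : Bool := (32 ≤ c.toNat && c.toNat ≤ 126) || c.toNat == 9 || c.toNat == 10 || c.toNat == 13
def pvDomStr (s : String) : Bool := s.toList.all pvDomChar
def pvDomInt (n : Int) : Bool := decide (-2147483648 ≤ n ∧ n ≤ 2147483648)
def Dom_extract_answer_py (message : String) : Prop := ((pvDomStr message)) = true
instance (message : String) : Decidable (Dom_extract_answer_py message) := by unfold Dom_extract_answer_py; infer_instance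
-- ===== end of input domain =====

-- B replaces A's loop over six letters and four prefix patterns by a direct
-- positional parse of the first two cleaned characters (objective: simpler).


-- ===== PORT A =====
-- A's body after message_clean = message.strip().upper(): the single-letter
-- check, then the per-letter loop over the patterns "X ", "X.", "X)", "(X"
-- (first matching letter wins).
def extract_answer_core_a (mc : List Char) : Option String :=
  if mc.length == 1 && decide (mc ∈ [['A'], ['B'], ['C'], ['D'], ['E'], ['F']]) then
    some (String.ofList mc)
  else
    (['A', 'B', 'C', 'D', 'E', 'F'] : List Char).findSome? (fun letter =>
      if PySem.Chars.startswith mc [letter, ' '] || PySem.Chars.startswith mc [letter, '.'] ||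
         PySem.Chars.startswith mc [letter, ')'] || PySem.Chars.startswith mc ['(', letter] then
        some (String.ofList [letter])
      else none)

def extract_answer_py (message : String) : Option String :=
  extract_answer_core_a (PySem.Chars.upper (PySem.Chars.strip message.toList))

-- ===== PORT B =====
-- B's body on the cleaned characters: a positional parse of the first two.
def extract_answer_core_b (mc : List Char) : Option String :=
  match mc with
  | [] => none
  | [c] => if c ∈ (['A','B','C','D','E','F'] : List Char) then some (String.ofList [c]) else none
  | c0 :: c1 :: _ =>
    if c0 ∈ (['A','B','C','D','E','F'] : List Char) && c1 ∈ ([' ','.',')'] : List Char) then some (String.ofList [c0])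
    else if c0 == '(' && c1 ∈ (['A','B','C','D','E','F'] : List Char) then some (String.ofList [c1])
    else none

def extract_answer_py_alt (message : String) : Option String :=
  extract_answer_core_b (PySem.Chars.upper (PySem.Chars.strip message.toList))

-- ===== PRECONDITION & SPEC =====
def Spec_extract_answer_py (message : String) (out : Option String) : Prop := out = extract_answer_py_alt message
instance (message : String) (out : Option String) : Decidable (Spec_extract_answer_py message out) := by unfold Spec_extract_answer_py; infer_instance

-- ===== CLAIM (what is proved, stated in full; the proofs are below) =====
def Claim_equal_extract_answer_py : Prop := ∀ (message : String), Dom_extract_answer_py message → Spec_extract_answer_py message (extract_answer_py message)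

-- ===== LEMMAS AND PROOFS =====

-- case split on the first cleaned character, then on the second; concrete
-- leaves close by rfl, the residual class by simp with the inequalities
set_option maxHeartbeats 1000000 in
theorem cons_case (c0 c1 : Char) (rest : List Char) :
    extract_answer_core_a (c0 :: c1 :: rest) = extract_answer_core_b (c0 :: c1 :: rest) := by
  obtain h | h | h | h | h | h | h | h :
      '(' = c0 ∨ 'A' = c0 ∨ 'B' = c0 ∨ 'C' = c0 ∨ 'D' = c0 ∨ 'E' = c0 ∨ 'F' = c0 ∨
      (¬'(' = c0 ∧ ¬'A' = c0 ∧ ¬'B' = c0 ∧ ¬'C' = c0 ∧ ¬'D' = c0 ∧ ¬'E' = c0 ∧ ¬'F' = c0) := by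
    tauto
  · subst h
    obtain g | g | g | g | g | g | g | g | g | g : ' ' = c1 ∨ '.' = c1 ∨ ')' = c1 ∨ 'A' = c1 ∨ 'B' = c1 ∨ 'C' = c1 ∨ 'D' = c1 ∨ 'E' = c1 ∨ 'F' = c1 ∨ (¬' ' = c1 ∧ ¬'.' = c1 ∧ ¬')' = c1 ∧ ¬'A' = c1 ∧ ¬'B' = c1 ∧ ¬'C' = c1 ∧ ¬'D' = c1 ∧ ¬'E' = c1 ∧ ¬'F' = c1) := by tauto
    · subst g; rfl
    · subst g; rfl
    · subst g; rfl
    · subst g; rfl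
    · subst g; rfl
    · subst g; rfl
    · subst g; rfl
    · subst g; rfl
    · subst g; rfl
    · obtain ⟨g1, g2, g3, g4, g5, g6, g7, g8, g9⟩ := g
      simp [extract_answer_core_a, extract_answer_core_b, PySem.Chars.startswith,
        List.isPrefixOf, g1, g2, g3, g4, g5, g6, g7, g8, g9, Ne.symm g1, Ne.symm g2, Ne.symm g3,
        Ne.symm g4, Ne.symm g5, Ne.symm g6, Ne.symm g7, Ne.symm g8, Ne.symm g9]
  · subst h
    obtain g | g | g | g | g | g | g | g | g | g : ' ' = c1 ∨ '.' = c1 ∨ ')' = c1 ∨ 'A' = c1 ∨ 'B' = c1 ∨ 'C' = c1 ∨ 'D' = c1 ∨ 'E' = c1 ∨ 'F' = c1 ∨ (¬' ' = c1 ∧ ¬'.' = c1 ∧ ¬')' = c1 ∧ ¬'A' = c1 ∧ ¬'B' = c1 ∧ ¬'C' = c1 ∧ ¬'D' = c1 ∧ ¬'E' = c1 ∧ ¬'F' = c1) := by tauto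
    · subst g; rfl
    · subst g; rfl
    · subst g; rfl
    · subst g; rfl
    · subst g; rfl
    · subst g; rfl
    · subst g; rfl
    · subst g; rfl
    · subst g; rfl
    · obtain ⟨g1, g2, g3, g4, g5, g6, g7, g8, g9⟩ := g
      simp [extract_answer_core_a, extract_answer_core_b, PySem.Chars.startswith,
        List.isPrefixOf, g1, g2, g3, g4, g5, g6, g7, g8, g9, Ne.symm g1, Ne.symm g2, Ne.symm g3,
        Ne.symm g4, Ne.symm g5, Ne.symm g6, Ne.symm g7, Ne.symm g8, Ne.symm g9]
  · subst h
    obtain g | g | g | g | g | g | g | g | g | g : ' ' = c1 ∨ '.' = c1 ∨ ')' = c1 ∨ 'A' = c1 ∨ 'B' = c1 ∨ 'C' = c1 ∨ 'D' = c1 ∨ 'E' = c1 ∨ 'F' = c1 ∨ (¬' ' = c1 ∧ ¬'.' = c1 ∧ ¬')' = c1 ∧ ¬'A' = c1 ∧ ¬'B' = c1 ∧ ¬'C' = c1 ∧ ¬'D' = c1 ∧ ¬'E' = c1 ∧ ¬'F' = c1) := by tauto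
    · subst g; rfl
    · subst g; rfl
    · subst g; rfl
    · subst g; rfl
    · subst g; rfl
    · subst g; rfl
    · subst g; rfl
    · subst g; rfl
    · subst g; rfl
    · obtain ⟨g1, g2, g3, g4, g5, g6, g7, g8, g9⟩ := g
      simp [extract_answer_core_a, extract_answer_core_b, PySem.Chars.startswith,
        List.isPrefixOf, g1, g2, g3, g4, g5, g6, g7, g8, g9, Ne.symm g1, Ne.symm g2, Ne.symm g3,
        Ne.symm g4, Ne.symm g5, Ne.symm g6, Ne.symm g7, Ne.symm g8, Ne.symm g9]
  · subst h
    obtain g | g | g | g | g | g | g | g | g | g : ' ' = c1 ∨ '.' = c1 ∨ ')' = c1 ∨ 'A' = c1 ∨ 'B' = c1 ∨ 'C' = c1 ∨ 'D' = c1 ∨ 'E' = c1 ∨ 'F' = c1 ∨ (¬' ' = c1 ∧ ¬'.' = c1 ∧ ¬')' = c1 ∧ ¬'A' = c1 ∧ ¬'B' = c1 ∧ ¬'C' = c1 ∧ ¬'D' = c1 ∧ ¬'E' = c1 ∧ ¬'F' = c1) := by tauto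
    · subst g; rfl
    · subst g; rfl
    · subst g; rfl
    · subst g; rfl
    · subst g; rfl
    · subst g; rfl
    · subst g; rfl
    · subst g; rfl
    · subst g; rfl
    · obtain ⟨g1, g2, g3, g4, g5, g6, g7, g8, g9⟩ := g
      simp [extract_answer_core_a, extract_answer_core_b, PySem.Chars.startswith,
        List.isPrefixOf, g1, g2, g3, g4, g5, g6, g7, g8, g9, Ne.symm g1, Ne.symm g2, Ne.symm g3,
        Ne.symm g4, Ne.symm g5, Ne.symm g6, Ne.symm g7, Ne.symm g8, Ne.symm g9]
  · subst h
    obtain g | g | g | g | g | g | g | g | g | g : ' ' = c1 ∨ '.' = c1 ∨ ')' = c1 ∨ 'A' = c1 ∨ 'B' = c1 ∨ 'C' = c1 ∨ 'D' = c1 ∨ 'E' = c1 ∨ 'F' = c1 ∨ (¬' ' = c1 ∧ ¬'.' = c1 ∧ ¬')' = c1 ∧ ¬'A' = c1 ∧ ¬'B' = c1 ∧ ¬'C' = c1 ∧ ¬'D' = c1 ∧ ¬'E' = c1 ∧ ¬'F' = c1) := by tauto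
    · subst g; rfl
    · subst g; rfl
    · subst g; rfl
    · subst g; rfl
    · subst g; rfl
    · subst g; rfl
    · subst g; rfl
    · subst g; rfl
    · subst g; rfl
    · obtain ⟨g1, g2, g3, g4, g5, g6, g7, g8, g9⟩ := g
      simp [extract_answer_core_a, extract_answer_core_b, PySem.Chars.startswith,
        List.isPrefixOf, g1, g2, g3, g4, g5, g6, g7, g8, g9, Ne.symm g1, Ne.symm g2, Ne.symm g3,
        Ne.symm g4, Ne.symm g5, Ne.symm g6, Ne.symm g7, Ne.symm g8, Ne.symm g9]
  · subst h
    obtain g | g | g | g | g | g | g | g | g | g : ' ' = c1 ∨ '.' = c1 ∨ ')' = c1 ∨ 'A' = c1 ∨ 'B' = c1 ∨ 'C' = c1 ∨ 'D' = c1 ∨ 'E' = c1 ∨ 'F' = c1 ∨ (¬' ' = c1 ∧ ¬'.' = c1 ∧ ¬')' = c1 ∧ ¬'A' = c1 ∧ ¬'B' = c1 ∧ ¬'C' = c1 ∧ ¬'D' = c1 ∧ ¬'E' = c1 ∧ ¬'F' = c1) := by tauto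
    · subst g; rfl
    · subst g; rfl
    · subst g; rfl
    · subst g; rfl
    · subst g; rfl
    · subst g; rfl
    · subst g; rfl
    · subst g; rfl
    · subst g; rfl
    · obtain ⟨g1, g2, g3, g4, g5, g6, g7, g8, g9⟩ := g
      simp [extract_answer_core_a, extract_answer_core_b, PySem.Chars.startswith,
        List.isPrefixOf, g1, g2, g3, g4, g5, g6, g7, g8, g9, Ne.symm g1, Ne.symm g2, Ne.symm g3,
        Ne.symm g4, Ne.symm g5, Ne.symm g6, Ne.symm g7, Ne.symm g8, Ne.symm g9]
  · subst h
    obtain g | g | g | g | g | g | g | g | g | g : ' ' = c1 ∨ '.' = c1 ∨ ')' = c1 ∨ 'A' = c1 ∨ 'B' = c1 ∨ 'C' = c1 ∨ 'D' = c1 ∨ 'E' = c1 ∨ 'F' = c1 ∨ (¬' ' = c1 ∧ ¬'.' = c1 ∧ ¬')' = c1 ∧ ¬'A' = c1 ∧ ¬'B' = c1 ∧ ¬'C' = c1 ∧ ¬'D' = c1 ∧ ¬'E' = c1 ∧ ¬'F' = c1) := by tauto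
    · subst g; rfl
    · subst g; rfl
    · subst g; rfl
    · subst g; rfl
    · subst g; rfl
    · subst g; rfl
    · subst g; rfl
    · subst g; rfl
    · subst g; rfl
    · obtain ⟨g1, g2, g3, g4, g5, g6, g7, g8, g9⟩ := g
      simp [extract_answer_core_a, extract_answer_core_b, PySem.Chars.startswith,
        List.isPrefixOf, g1, g2, g3, g4, g5, g6, g7, g8, g9, Ne.symm g1, Ne.symm g2, Ne.symm g3,
        Ne.symm g4, Ne.symm g5, Ne.symm g6, Ne.symm g7, Ne.symm g8, Ne.symm g9]
  · obtain ⟨h1, h2, h3, h4, h5, h6, h7⟩ := h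
    simp [extract_answer_core_a, extract_answer_core_b, PySem.Chars.startswith,
      List.isPrefixOf, Ne.symm h1, Ne.symm h2, Ne.symm h3, Ne.symm h4, Ne.symm h5, Ne.symm h6,
      Ne.symm h7, h1, h2, h3, h4, h5, h6, h7]

theorem single_case (c : Char) :
    extract_answer_core_a [c] = extract_answer_core_b [c] := by
  obtain h | h | h | h | h | h | h :
      'A' = c ∨ 'B' = c ∨ 'C' = c ∨ 'D' = c ∨ 'E' = c ∨ 'F' = c ∨
      (¬'A' = c ∧ ¬'B' = c ∧ ¬'C' = c ∧ ¬'D' = c ∧ ¬'E' = c ∧ ¬'F' = c) := by tauto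
  · subst h; rfl
  · subst h; rfl
  · subst h; rfl
  · subst h; rfl
  · subst h; rfl
  · subst h; rfl
  · obtain ⟨h1, h2, h3, h4, h5, h6⟩ := h
    simp [extract_answer_core_a, extract_answer_core_b, PySem.Chars.startswith,
      List.isPrefixOf, h1, h2, h3, h4, h5, h6, Ne.symm h1, Ne.symm h2, Ne.symm h3,
      Ne.symm h4, Ne.symm h5, Ne.symm h6]

theorem cores_agree (mc : List Char) :
    extract_answer_core_a mc = extract_answer_core_b mc := by
  match mc with
  | [] => rfl
  | [c] => exact single_case c
  | c0 :: c1 :: rest => exact cons_case c0 c1 rest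

-- ===== VERDICT (by name: the statement is the Claim_ definition above) =====
theorem extract_answer_py_spec : Claim_equal_extract_answer_py := by
  intro message _
  unfold Spec_extract_answer_py extract_answer_py extract_answer_py_alt
  exact cores_agree _
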